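-- pv_equiv track=rewrite | github.com/venopyX/alx-frontend-for-fun | markdown2html.py | parse_paragraphs
-- ===== SOURCE A (Python) =====
-- def parse_paragraphs(content):
--     """
--     Parses markdown paragraphs and converts them to HTML.
--     Handles multi-line paragraphs with <br/> tags.
--     """
--     lines = content.split('\n')
--     html_lines = []
--     current_paragraph = []
--
--     for line in lines:
--         if (line.strip() and not (line.strip().startswith('<h') or
--                                   line.strip().startswith('<li>') or
--                                   line.strip().startswith('<ul>') or
--                                   line.strip().startswith('</ul>') or
--                                   line.strip().startswith('<ol>') or
--                                   line.strip().startswith('</ol>'))):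
--             current_paragraph.append(line.strip())
--         else:
--             if current_paragraph:
--                 html_lines.append("<p>")
--
--                 for i, para_line in enumerate(current_paragraph):
--                     html_lines.append(para_line)
--                     if i < len(current_paragraph) - 1:
--                         html_lines.append("<br/>")
--
--                 html_lines.append("</p>")
--                 current_paragraph = []
--
--             if line.strip() or not current_paragraph:
--                 html_lines.append(line)
--
--     if current_paragraph:
--         html_lines.append("<p>")
--
--         for i, para_line in enumerate(current_paragraph):
--             html_lines.append(para_line)
--             if i < len(current_paragraph) - 1:
--                 html_lines.append("<br/>")
--
--         html_lines.append("</p>")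
--
--     return '\n'.join(html_lines)
-- ===== SOURCE B (Python) =====
-- def parse_paragraphs(content):
--     """Run-partitioning rewrite: scan maximal runs of paragraph lines and
--     emit each run as one <p>...</p> block; all other lines pass through verbatim."""
--     def is_para(line):
--         s = line.strip()
--         return bool(s) and not s.startswith(('<h', '<li>', '<ul>', '</ul>', '<ol>', '</ol>'))
--
--     lines = content.split('\n')
--     n = len(lines)
--     out = []
--     i = 0
--     while i < n:
--         if is_para(lines[i]):
--             j = i
--             run = []
--             while j < n and is_para(lines[j]):
--                 run.append(lines[j].strip())
--                 j += 1
--             out.append("<p>\n" + "\n<br/>\n".join(run) + "\n</p>")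
--             i = j
--         else:
--             out.append(lines[i])
--             i += 1
--     return '\n'.join(out)
-- ===== Notes on version B (the rewrite author's own statement) =====
-- stated objective: alternative
-- what changed: Replaced A's accumulate/flush state machine (a per-line fold carrying a pending-paragraph buffer that is flushed with an enumerate/<br/> loop) by a run-partitioning scan: two nested index loops take each maximal run of paragraph lines and emit it as one pre-joined <p>...</p> block string, non-paragraph lines passing through verbatim.
import Mathlib
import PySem

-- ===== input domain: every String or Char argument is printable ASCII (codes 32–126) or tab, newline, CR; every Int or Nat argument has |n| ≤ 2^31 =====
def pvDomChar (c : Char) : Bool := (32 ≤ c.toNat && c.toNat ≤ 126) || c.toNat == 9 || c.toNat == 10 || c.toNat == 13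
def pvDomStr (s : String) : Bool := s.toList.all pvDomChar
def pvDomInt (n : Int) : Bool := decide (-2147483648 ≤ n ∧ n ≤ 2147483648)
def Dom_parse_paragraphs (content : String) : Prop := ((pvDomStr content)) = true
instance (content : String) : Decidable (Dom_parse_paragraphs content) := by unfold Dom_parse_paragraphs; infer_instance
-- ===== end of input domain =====

-- B replaces A's accumulate/flush state machine by a run-partitioning scan that emits each
-- maximal run of paragraph lines as one <p>…</p> block (objective: alternative decomposition).

-- ===== PORT A =====
def pvIsParaA (line : List Char) : Bool :=
  !(PySem.Chars.strip line).isEmpty &&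
  !(PySem.Chars.startswith (PySem.Chars.strip line) "<h".toList ||
    PySem.Chars.startswith (PySem.Chars.strip line) "<li>".toList ||
    PySem.Chars.startswith (PySem.Chars.strip line) "<ul>".toList ||
    PySem.Chars.startswith (PySem.Chars.strip line) "</ul>".toList ||
    PySem.Chars.startswith (PySem.Chars.strip line) "<ol>".toList ||
    PySem.Chars.startswith (PySem.Chars.strip line) "</ol>".toList)

-- the flush: html_lines.append("<p>"); the enumerate loop with "<br/>" between lines; "</p>"
def pvFlushA (html : List (List Char)) (cur : List (List Char)) : List (List Char) :=
  ((PySem.List.enumerate cur).foldl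
    (fun h ip =>
      let h := h ++ [ip.2]
      if ip.1 < (cur.length : Int) - 1 then h ++ ["<br/>".toList] else h)
    (html ++ ["<p>".toList])) ++ ["</p>".toList]

def pvStepA (st : List (List Char) × List (List Char)) (line : List Char) :
    List (List Char) × List (List Char) :=
  if pvIsParaA line then (st.1, st.2 ++ [PySem.Chars.strip line])
  else
    let st := if st.2 ≠ [] then (pvFlushA st.1 st.2, ([] : List (List Char))) else st
    if ¬ (PySem.Chars.strip line).isEmpty ∨ st.2 = [] then (st.1 ++ [line], st.2) else st

def parse_paragraphs (content : String) : String :=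
  let lines := (PySem.Chars.split? content.toList ['\n']).getD []
  let st := lines.foldl pvStepA ([], [])
  let html := if st.2 ≠ [] then pvFlushA st.1 st.2 else st.1
  String.ofList (PySem.Chars.join ['\n'] html)

-- ===== PORT B =====
def pvIsParaB (line : List Char) : Bool :=
  let s := PySem.Chars.strip line
  !s.isEmpty &&
  !(PySem.Chars.startswith s "<h".toList || PySem.Chars.startswith s "<li>".toList ||
    PySem.Chars.startswith s "<ul>".toList || PySem.Chars.startswith s "</ul>".toList ||
    PySem.Chars.startswith s "<ol>".toList || PySem.Chars.startswith s "</ol>".toList)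

-- one <p>…</p> block from the stripped lines of a run
def pvBlock (run : List (List Char)) : List Char :=
  "<p>\n".toList ++ PySem.Chars.join "\n<br/>\n".toList run ++ "\n</p>".toList

-- the inner `while j < n and is_para(lines[j])` loop: stripped run / remainder
def pvTakeRun : List (List Char) → List (List Char)
  | [] => []
  | l :: rest => if pvIsParaB l then PySem.Chars.strip l :: pvTakeRun rest else []

def pvDropRun : List (List Char) → List (List Char)
  | [] => []
  | l :: rest => if pvIsParaB l then pvDropRun rest else l :: rest

theorem pvDropRun_length_le : ∀ xs : List (List Char), (pvDropRun xs).length ≤ xs.length := by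
  intro xs
  induction xs with
  | nil => simp [pvDropRun]
  | cons l rest ih =>
    simp only [pvDropRun]
    split
    · exact Nat.le_succ_of_le ih
    · simp

-- the outer `while i < n` loop of Source B
def pvGoB : List (List Char) → List (List Char)
  | [] => []
  | l :: rest =>
    if pvIsParaB l then
      pvBlock (PySem.Chars.strip l :: pvTakeRun rest) :: pvGoB (pvDropRun rest)
    else l :: pvGoB rest
termination_by xs => xs.length
decreasing_by
  · exact Nat.lt_succ_of_le (pvDropRun_length_le rest)
  · simp

def parse_paragraphs_alt (content : String) : String :=
  let lines := (PySem.Chars.split? content.toList ['\n']).getD []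
  String.ofList (PySem.Chars.join ['\n'] (pvGoB lines))

-- ===== PRECONDITION & SPEC =====
def Spec_parse_paragraphs (content : String) (out : String) : Prop := out = parse_paragraphs_alt content
instance (content : String) (out : String) : Decidable (Spec_parse_paragraphs content out) := by unfold Spec_parse_paragraphs; infer_instance

-- ===== CLAIM (what is proved, stated in full; the proofs are below) =====
def Claim_equal_parse_paragraphs : Prop := ∀ (content : String), Dom_parse_paragraphs content → Spec_parse_paragraphs content (parse_paragraphs content)

-- ===== LEMMAS AND PROOFS =====

theorem pvIsPara_eq (l : List Char) : pvIsParaA l = pvIsParaB l := rfl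

def pvNl : List Char := ['\n']

-- proof-side: A's flush as a plain list, intersperse form
def pvInter : List (List Char) → List (List Char)
  | [] => []
  | [a] => [a]
  | a :: b :: t => a :: "<br/>".toList :: pvInter (b :: t)

def pvSeg (cur : List (List Char)) : List (List Char) :=
  "<p>".toList :: (pvInter cur ++ ["</p>".toList])

-- proof-side: A's state machine as a recursion over the lines
def pvGoA : List (List Char) → List (List Char) → List (List Char)
  | [], cur => if cur ≠ [] then pvSeg cur else []
  | l :: rest, cur =>
    if pvIsParaA l then pvGoA rest (cur ++ [PySem.Chars.strip l])
    else (if cur ≠ [] then pvSeg cur else []) ++ [l] ++ pvGoA rest []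

theorem pvInter_ne_nil : ∀ cur : List (List Char), cur ≠ [] → pvInter cur ≠ [] := by
  intro cur h
  match cur with
  | [a] => simp [pvInter]
  | a :: b :: t => simp [pvInter]

theorem pvEnumFold (N : Int) :
    ∀ (cur : List (List Char)) (s : Int) (h : List (List Char)),
      s + cur.length = N → cur ≠ [] →
      ((PySem.List.enumerate cur s).foldl
        (fun h ip =>
          let h := h ++ [ip.2]
          if ip.1 < N - 1 then h ++ ["<br/>".toList] else h) h)
      = h ++ pvInter cur := by
  intro cur
  induction cur with
  | nil => intro s h _ hne; exact absurd rfl hne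
  | cons a t ih =>
    intro s h hs _
    match t, ih with
    | [], _ =>
      have : ¬ (s < N - 1) := by simp at hs; omega
      simp [PySem.List.enumerate, this, pvInter]
    | b :: t', ih =>
      have hcond : s < N - 1 := by simp at hs; omega
      rw [show PySem.List.enumerate (a :: b :: t') s
            = (s, a) :: PySem.List.enumerate (b :: t') (s + 1) from by
            simp [PySem.List.enumerate],
          List.foldl_cons]
      simp only [hcond, if_true]
      rw [ih (s + 1) (h ++ [a] ++ ["<br/>".toList]) (by simp at hs ⊢; omega) (by simp)]
      simp [pvInter]

theorem pvFlushA_eq (html cur : List (List Char)) (hc : cur ≠ []) :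
    pvFlushA html cur = html ++ pvSeg cur := by
  unfold pvFlushA
  rw [pvEnumFold (cur.length : Int) cur 0 (html ++ ["<p>".toList]) (by simp) hc]
  simp [pvSeg]

theorem pvFoldA : ∀ (lines : List (List Char)) (html cur : List (List Char)),
    (let st := lines.foldl pvStepA (html, cur)
     if st.2 ≠ [] then pvFlushA st.1 st.2 else st.1) = html ++ pvGoA lines cur := by
  intro lines
  induction lines with
  | nil =>
    intro html cur
    simp only [List.foldl, pvGoA]
    by_cases hc : cur = []
    · simp [hc]
    · simp [hc, pvFlushA_eq html cur hc]
  | cons l rest ih =>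
    intro html cur
    simp only [List.foldl, pvGoA, pvStepA]
    by_cases hp : pvIsParaA l
    · simp only [hp, if_true]
      exact ih html (cur ++ [PySem.Chars.strip l])
    · simp only [hp, if_false, Bool.false_eq_true]
      by_cases hc : cur = []
      · subst hc
        simp only [ne_eq, not_true_eq_false, reduceIte, or_true]
        rw [ih (html ++ [l]) []]
        simp
      · simp only [ne_eq, hc, not_false_eq_true, reduceIte, or_true]
        rw [ih (pvFlushA html cur ++ [l]) [], pvFlushA_eq html cur hc]
        simp

-- join over a cons, with the tail possibly empty
theorem pvJoinCons (sep a : List Char) (t : List (List Char)) :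
    PySem.Chars.join sep (a :: t)
      = a ++ (if t = [] then [] else sep ++ PySem.Chars.join sep t) := by
  match t with
  | [] => simp [PySem.Chars.join_singleton]
  | b :: t' => simp [PySem.Chars.join_cons_cons]

theorem pvJoinAppend (sep : List Char) :
    ∀ (xs ys : List (List Char)), xs ≠ [] → ys ≠ [] →
      PySem.Chars.join sep (xs ++ ys)
        = PySem.Chars.join sep xs ++ sep ++ PySem.Chars.join sep ys := by
  intro xs
  induction xs with
  | nil => intro ys h _; exact absurd rfl h
  | cons a t ih =>
    intro ys _ hy
    match t with
    | [] =>
      rw [List.singleton_append, pvJoinCons sep a ys, PySem.Chars.join_singleton]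
      simp [hy]
    | b :: t' =>
      rw [List.cons_append, pvJoinCons sep a ((b :: t') ++ ys),
          PySem.Chars.join_cons_cons, ih ys (by simp) hy]
      simp

theorem pvInterJoin : ∀ cur : List (List Char), cur ≠ [] →
    PySem.Chars.join pvNl (pvInter cur)
      = PySem.Chars.join "\n<br/>\n".toList cur := by
  intro cur h
  match cur with
  | [a] => simp [pvInter, PySem.Chars.join_singleton]
  | a :: b :: t =>
    have ih := pvInterJoin (b :: t) (by simp)
    simp only [pvInter]
    rw [PySem.Chars.join_cons_cons, pvJoinCons pvNl "<br/>".toList (pvInter (b :: t)),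
        if_neg (pvInter_ne_nil (b :: t) (by simp)), ih, PySem.Chars.join_cons_cons]
    simp [pvNl]

theorem pvSegJoin (cur : List (List Char)) (hc : cur ≠ []) :
    PySem.Chars.join pvNl (pvSeg cur) = pvBlock cur := by
  unfold pvSeg pvBlock
  rw [pvJoinCons pvNl "<p>".toList (pvInter cur ++ ["</p>".toList]),
      if_neg (by simp : ¬ (pvInter cur ++ ["</p>".toList] = [])),
      pvJoinAppend pvNl (pvInter cur) ["</p>".toList] (pvInter_ne_nil cur hc) (by simp),
      pvInterJoin cur hc, PySem.Chars.join_singleton]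
  simp [pvNl]

theorem pvGoA_ne_nil : ∀ (lines cur : List (List Char)), lines ≠ [] ∨ cur ≠ [] →
    pvGoA lines cur ≠ [] := by
  intro lines
  induction lines with
  | nil =>
    intro cur h
    rcases h with h | h
    · exact absurd rfl h
    · simp [pvGoA, h, pvSeg]
  | cons l rest ih =>
    intro cur _
    simp only [pvGoA]
    by_cases hp : pvIsParaA l
    · simp only [hp, if_true]
      exact ih (cur ++ [PySem.Chars.strip l]) (Or.inr (by simp))
    · simp [hp]

theorem pvTail :
    ∀ rest : List (List Char),
      PySem.Chars.join pvNl (pvGoA rest []) = PySem.Chars.join pvNl (pvGoB rest) →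
      ∀ l : List Char,
        PySem.Chars.join pvNl (l :: pvGoA rest []) = PySem.Chars.join pvNl (l :: pvGoB rest) := by
  intro rest hM l
  match rest with
  | [] => simp [pvGoA, pvGoB]
  | r :: rs =>
    have hA : pvGoA (r :: rs) [] ≠ [] := pvGoA_ne_nil (r :: rs) [] (Or.inl (by simp))
    have hB : pvGoB (r :: rs) ≠ [] := by
      rw [pvGoB]
      by_cases hp : pvIsParaB r <;> simp [hp]
    rw [pvJoinCons pvNl l (pvGoA (r :: rs) []), pvJoinCons pvNl l (pvGoB (r :: rs))]
    simp [hA, hB, hM]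

theorem pvMain : ∀ lines : List (List Char),
    (PySem.Chars.join pvNl (pvGoA lines []) = PySem.Chars.join pvNl (pvGoB lines)) ∧
    (∀ cur : List (List Char), cur ≠ [] →
      PySem.Chars.join pvNl (pvGoA lines cur)
        = PySem.Chars.join pvNl
            (pvBlock (cur ++ pvTakeRun lines) :: pvGoB (pvDropRun lines))) := by
  intro lines
  induction lines with
  | nil =>
    constructor
    · simp [pvGoA, pvGoB]
    · intro cur hc
      simp only [pvGoA, pvGoB, pvTakeRun, pvDropRun, ne_eq, hc, not_false_eq_true, if_true,
        List.append_nil]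
      rw [pvSegJoin cur hc, PySem.Chars.join_singleton]
  | cons l rest ih =>
    obtain ⟨ihM, ihR⟩ := ih
    have hMstep :
        PySem.Chars.join pvNl (pvGoA (l :: rest) []) = PySem.Chars.join pvNl (pvGoB (l :: rest)) := by
      rw [pvGoB]
      by_cases hp : pvIsParaA l
      · have hpB : pvIsParaB l = true := by rw [← pvIsPara_eq]; exact hp
        simp only [pvGoA, hp, if_true, hpB, List.nil_append]
        exact ihR [PySem.Chars.strip l] (by simp)
      · have hpB : ¬ pvIsParaB l = true := by rw [← pvIsPara_eq]; exact hp
        simp only [pvGoA, hp, if_false, hpB, Bool.false_eq_true, ne_eq, not_true_eq_false,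
          List.nil_append, List.singleton_append]
        exact pvTail rest ihM l
    refine ⟨hMstep, ?_⟩
    intro cur hc
    by_cases hp : pvIsParaA l
    · have hpB : pvIsParaB l = true := by rw [← pvIsPara_eq]; exact hp
      simp only [pvGoA, hp, if_true, pvTakeRun, pvDropRun, hpB]
      rw [ihR (cur ++ [PySem.Chars.strip l]) (by simp)]
      simp
    · have hpB : ¬ pvIsParaB l = true := by rw [← pvIsPara_eq]; exact hp
      have hBeq : pvGoB (l :: rest) = l :: pvGoB rest := by
        rw [pvGoB]; simp [hpB]
      simp only [pvGoA, hp, if_false, pvTakeRun, pvDropRun, hpB, Bool.false_eq_true, ne_eq, hc,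
        not_false_eq_true, reduceIte, List.append_nil]
      rw [show pvSeg cur ++ [l] ++ pvGoA rest [] = pvSeg cur ++ (l :: pvGoA rest []) by simp,
          pvJoinAppend pvNl (pvSeg cur) (l :: pvGoA rest []) (by simp [pvSeg]) (by simp),
          pvSegJoin cur hc, hBeq,
          pvJoinCons pvNl (pvBlock cur) (l :: pvGoB rest),
          if_neg (by simp : ¬ (l :: pvGoB rest = [])),
          pvTail rest ihM l]
      simp

-- ===== VERDICT (by name: the statement is the Claim_ definition above) =====
theorem parse_paragraphs_spec : Claim_equal_parse_paragraphs := by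
  intro content _
  unfold Spec_parse_paragraphs parse_paragraphs parse_paragraphs_alt
  simp only []
  rw [pvFoldA ((PySem.Chars.split? content.toList ['\n']).getD []) [] []]
  have := (pvMain ((PySem.Chars.split? content.toList ['\n']).getD [])).1
  simp only [pvNl] at this
  simp [this]
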